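-- pv_equiv track=rewrite | github.com/joshwalawender/KeckUtilities | get_vnc_sessions.py | determine_instrument
-- ===== SOURCE A (Python) =====
-- def determine_instrument(accountname):
--     accounts = {'mosfire': [f'mosfire{i}' for i in range(1,10)],
--                 'hires': [f'hires{i}' for i in range(1,10)],
--                 'osiris': [f'osiris{i}' for i in range(1,10)],
--                 'lris': [f'lris{i}' for i in range(1,10)],
--                 'nires': [f'nires{i}' for i in range(1,10)],
--                 'deimos': [f'deimos{i}' for i in range(1,10)],
--                 'esi': [f'esi{i}' for i in range(1,10)],
--                 'nirc2': [f'nirc{i}' for i in range(1,10)],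
--                 'nirspec': [f'nirspec{i}' for i in range(1,10)],
--                 'kcwi': [f'kcwi{i}' for i in range(1,10)],
--                }
--     accounts['mosfire'].append('moseng')
--     accounts['hires'].append('hireseng')
--     accounts['osiris'].append('osiriseng')
--     accounts['lris'].append('lriseng')
--     accounts['nires'].append('nireseng')
--     accounts['deimos'].append('dmoseng')
--     accounts['esi'].append('esieng')
--     accounts['nirc2'].append('nirceng')
--     accounts['nirspec'].append('nirspeceng')
--     accounts['kcwi'].append('kcwieng')
--
--     telescope = {'mosfire': 1,
--                  'hires': 1,
--                  'osiris': 1,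
--                  'lris': 1,
--                  'nires': 2,
--                  'deimos': 2,
--                  'esi': 2,
--                  'nirc2': 2,
--                  'nirspec': 2,
--                  'kcwi': 2,
--                 }
--
--     for instrument in accounts.keys():
--         if accountname.lower() in accounts[instrument]:
--             return instrument, telescope[instrument]
-- ===== SOURCE B (Python) =====
-- def determine_instrument(accountname):
--     instruments = [('mosfire', 1, 'moseng'),
--                    ('hires', 1, 'hireseng'),
--                    ('osiris', 1, 'osiriseng'),
--                    ('lris', 1, 'lriseng'),
--                    ('nires', 2, 'nireseng'),
--                    ('deimos', 2, 'dmoseng'),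
--                    ('esi', 2, 'esieng'),
--                    ('nirc2', 2, 'nirceng'),
--                    ('nirspec', 2, 'nirspeceng'),
--                    ('kcwi', 2, 'kcwieng')]
--     lookup = {}
--     for name, tel, eng in instruments:
--         prefix = 'nirc' if name == 'nirc2' else name
--         for i in range(1, 10):
--             lookup[f'{prefix}{i}'] = (name, tel)
--         lookup[eng] = (name, tel)
--     return lookup.get(accountname.lower())
-- ===== Notes on version B (the rewrite author's own statement) =====
-- stated objective: simpler
-- what changed: Replaces A's per-instrument name-list dict plus a scan loop with membership tests by one flat dictionary keyed directly by lowercase account name, built in a single pass and answered with one .get() lookup.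
import Mathlib
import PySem

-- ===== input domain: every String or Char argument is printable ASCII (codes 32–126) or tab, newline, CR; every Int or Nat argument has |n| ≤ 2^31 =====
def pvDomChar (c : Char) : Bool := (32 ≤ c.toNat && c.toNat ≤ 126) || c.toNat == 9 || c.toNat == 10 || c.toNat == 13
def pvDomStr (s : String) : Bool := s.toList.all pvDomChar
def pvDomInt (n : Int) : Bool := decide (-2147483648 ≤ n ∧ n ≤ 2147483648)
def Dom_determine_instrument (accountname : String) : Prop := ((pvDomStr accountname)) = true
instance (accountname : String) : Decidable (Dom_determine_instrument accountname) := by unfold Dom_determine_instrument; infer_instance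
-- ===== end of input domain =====

-- B replaces A's per-instrument scan with membership tests by one flat account→(instrument, telescope)
-- dictionary answered by a single lookup (objective: simpler). Return values proved equal for every string.

-- ===== PORT A =====
-- A's loop 'for instrument in accounts.keys(): if … in accounts[instrument]: return …'
-- (accounts[instrument]/telescope[instrument] never raise: every iterated key is a key of both dicts,
-- so getD is exact here).
def pvLoopA (t : String) (accounts : PySem.Dict String (List String))
    (telescope : PySem.Dict String Int) : List String → Option (String × Int)
  | [] => none
  | k :: rest =>
      if (accounts.getD k []).contains t then some (k, telescope.getD k 0)
      else pvLoopA t accounts telescope rest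

def determine_instrument (accountname : String) : Option (String × Int) :=
  let accounts : PySem.Dict String (List String) := PySem.Dict.ofList
    [("mosfire", (PySem.List.pyRange 1 10 1).map (fun i => "mosfire" ++ PySem.Int.toStr i)),
     ("hires",   (PySem.List.pyRange 1 10 1).map (fun i => "hires" ++ PySem.Int.toStr i)),
     ("osiris",  (PySem.List.pyRange 1 10 1).map (fun i => "osiris" ++ PySem.Int.toStr i)),
     ("lris",    (PySem.List.pyRange 1 10 1).map (fun i => "lris" ++ PySem.Int.toStr i)),
     ("nires",   (PySem.List.pyRange 1 10 1).map (fun i => "nires" ++ PySem.Int.toStr i)),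
     ("deimos",  (PySem.List.pyRange 1 10 1).map (fun i => "deimos" ++ PySem.Int.toStr i)),
     ("esi",     (PySem.List.pyRange 1 10 1).map (fun i => "esi" ++ PySem.Int.toStr i)),
     ("nirc2",   (PySem.List.pyRange 1 10 1).map (fun i => "nirc" ++ PySem.Int.toStr i)),
     ("nirspec", (PySem.List.pyRange 1 10 1).map (fun i => "nirspec" ++ PySem.Int.toStr i)),
     ("kcwi",    (PySem.List.pyRange 1 10 1).map (fun i => "kcwi" ++ PySem.Int.toStr i))]
  let accounts := accounts.modify "mosfire" [] (fun l => l ++ ["moseng"])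
  let accounts := accounts.modify "hires" [] (fun l => l ++ ["hireseng"])
  let accounts := accounts.modify "osiris" [] (fun l => l ++ ["osiriseng"])
  let accounts := accounts.modify "lris" [] (fun l => l ++ ["lriseng"])
  let accounts := accounts.modify "nires" [] (fun l => l ++ ["nireseng"])
  let accounts := accounts.modify "deimos" [] (fun l => l ++ ["dmoseng"])
  let accounts := accounts.modify "esi" [] (fun l => l ++ ["esieng"])
  let accounts := accounts.modify "nirc2" [] (fun l => l ++ ["nirceng"])
  let accounts := accounts.modify "nirspec" [] (fun l => l ++ ["nirspeceng"])
  let accounts := accounts.modify "kcwi" [] (fun l => l ++ ["kcwieng"])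
  let telescope : PySem.Dict String Int := PySem.Dict.ofList
    [("mosfire", 1), ("hires", 1), ("osiris", 1), ("lris", 1), ("nires", 2),
     ("deimos", 2), ("esi", 2), ("nirc2", 2), ("nirspec", 2), ("kcwi", 2)]
  pvLoopA (PySem.Str.lower accountname) accounts telescope accounts.keys

-- ===== PORT B =====
def determine_instrument_alt (accountname : String) : Option (String × Int) :=
  let instruments : List (String × Int × String) :=
    [("mosfire", 1, "moseng"), ("hires", 1, "hireseng"), ("osiris", 1, "osiriseng"),
     ("lris", 1, "lriseng"), ("nires", 2, "nireseng"), ("deimos", 2, "dmoseng"),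
     ("esi", 2, "esieng"), ("nirc2", 2, "nirceng"), ("nirspec", 2, "nirspeceng"),
     ("kcwi", 2, "kcwieng")]
  let lookup : PySem.Dict String (String × Int) := instruments.foldl
    (fun d x =>
      let name := x.1
      let tel := x.2.1
      let eng := x.2.2
      let pre := if name == "nirc2" then "nirc" else name
      let d := (PySem.List.pyRange 1 10 1).foldl
        (fun d i => d.insert (pre ++ PySem.Int.toStr i) (name, tel)) d
      d.insert eng (name, tel))
    PySem.Dict.empty
  lookup.get? (PySem.Str.lower accountname)

-- ===== PRECONDITION & SPEC =====
def Spec_determine_instrument (accountname : String) (out : Option (String × Int)) : Prop := out = determine_instrument_alt accountname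
instance (accountname : String) (out : Option (String × Int)) : Decidable (Spec_determine_instrument accountname out) := by unfold Spec_determine_instrument; infer_instance

-- ===== CLAIM (what is proved, stated in full; the proofs are below) =====
def Claim_equal_determine_instrument : Prop := ∀ (accountname : String), Dom_determine_instrument accountname → Spec_determine_instrument accountname (determine_instrument accountname)

-- ===== LEMMAS AND PROOFS =====

-- the ten account-name lists, as they appear after A's comprehensions and appends
def pvN1 : List String := ["mosfire1","mosfire2","mosfire3","mosfire4","mosfire5","mosfire6","mosfire7","mosfire8","mosfire9","moseng"]
def pvN2 : List String := ["hires1","hires2","hires3","hires4","hires5","hires6","hires7","hires8","hires9","hireseng"]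
def pvN3 : List String := ["osiris1","osiris2","osiris3","osiris4","osiris5","osiris6","osiris7","osiris8","osiris9","osiriseng"]
def pvN4 : List String := ["lris1","lris2","lris3","lris4","lris5","lris6","lris7","lris8","lris9","lriseng"]
def pvN5 : List String := ["nires1","nires2","nires3","nires4","nires5","nires6","nires7","nires8","nires9","nireseng"]
def pvN6 : List String := ["deimos1","deimos2","deimos3","deimos4","deimos5","deimos6","deimos7","deimos8","deimos9","dmoseng"]
def pvN7 : List String := ["esi1","esi2","esi3","esi4","esi5","esi6","esi7","esi8","esi9","esieng"]
def pvN8 : List String := ["nirc1","nirc2","nirc3","nirc4","nirc5","nirc6","nirc7","nirc8","nirc9","nirceng"]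
def pvN9 : List String := ["nirspec1","nirspec2","nirspec3","nirspec4","nirspec5","nirspec6","nirspec7","nirspec8","nirspec9","nirspeceng"]
def pvN10 : List String := ["kcwi1","kcwi2","kcwi3","kcwi4","kcwi5","kcwi6","kcwi7","kcwi8","kcwi9","kcwieng"]

-- a block of the flat lookup: every name mapped to the same value
def pvBlk (names : List String) (v : String × Int) : List (String × (String × Int)) :=
  names.map (fun n => (n, v))

-- the flat dictionary B builds, written block by block
def pvFlat : List (String × (String × Int)) :=
  pvBlk pvN1 ("mosfire", 1) ++ (pvBlk pvN2 ("hires", 1) ++ (pvBlk pvN3 ("osiris", 1) ++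
  (pvBlk pvN4 ("lris", 1) ++ (pvBlk pvN5 ("nires", 2) ++ (pvBlk pvN6 ("deimos", 2) ++
  (pvBlk pvN7 ("esi", 2) ++ (pvBlk pvN8 ("nirc2", 2) ++ (pvBlk pvN9 ("nirspec", 2) ++
  pvBlk pvN10 ("kcwi", 2)))))))))

-- A's loop, fully evaluated on its concrete dicts: a chain of membership tests
def pvChain (t : String) : Option (String × Int) :=
  if pvN1.contains t then some ("mosfire", 1)
  else if pvN2.contains t then some ("hires", 1)
  else if pvN3.contains t then some ("osiris", 1)
  else if pvN4.contains t then some ("lris", 1)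
  else if pvN5.contains t then some ("nires", 2)
  else if pvN6.contains t then some ("deimos", 2)
  else if pvN7.contains t then some ("esi", 2)
  else if pvN8.contains t then some ("nirc2", 2)
  else if pvN9.contains t then some ("nirspec", 2)
  else if pvN10.contains t then some ("kcwi", 2)
  else none

set_option maxRecDepth 100000 in
lemma pvA_eval (a : String) : determine_instrument a = pvChain (PySem.Str.lower a) := rfl

set_option maxRecDepth 100000 in
lemma pvB_eval (a : String) :
    determine_instrument_alt a = (PySem.Dict.mk pvFlat).get? (PySem.Str.lower a) := rfl

lemma pv_get_blk (names : List String) (v : String × Int)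
    (rest : List (String × (String × Int))) (t : String) :
    (PySem.Dict.mk (pvBlk names v ++ rest)).get? t =
      if names.contains t then some v else (PySem.Dict.mk rest).get? t := by
  induction names with
  | nil => simp [pvBlk]
  | cons n ns ih =>
      simp only [pvBlk] at ih ⊢
      simp only [List.map_cons, List.cons_append, PySem.Dict.get?_mk_cons, List.contains_cons]
      by_cases h : n = t
      · subst h; simp
      · have h1 : (n == t) = false := beq_eq_false_iff_ne.mpr h
        have h2 : (t == n) = false := beq_eq_false_iff_ne.mpr (Ne.symm h)
        simp [h1, h2, ih]

lemma pv_chain_eq_flat (t : String) : pvChain t = (PySem.Dict.mk pvFlat).get? t := by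
  rw [pvFlat.eq_def, show pvBlk pvN10 ("kcwi", 2) = pvBlk pvN10 ("kcwi", 2) ++ [] from (List.append_nil _).symm]
  simp only [pv_get_blk]
  have h0 : (PySem.Dict.mk ([] : List (String × (String × Int)))).get? t = none := rfl
  rw [h0, pvChain.eq_def]

-- ===== VERDICT (by name: the statement is the Claim_ definition above) =====
theorem determine_instrument_spec : Claim_equal_determine_instrument := by
  intro a _
  unfold Spec_determine_instrument
  rw [pvA_eval, pvB_eval, pv_chain_eq_flat]
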